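-- pv_equiv track=rewrite | github.com/klalollol/work_highs | ai_builder/alphabetsearching.py | AlphabetSearching
-- ===== SOURCE A (Python) =====
-- def AlphabetSearching(strParam):
--   count = 0
--   alphabet = "abcdefghijklmnopqrstuvwsyz"
--   alp_list = list(alphabet)
--   t = set(list(strParam))
--   text = list(t)
--   for i in range (0,len(text)):
--     if text[i].isalpha() == False:
--       pass
--     for y in range (0,26):
--       if alp_list[y] == text[i]:
--         count +=1
--       else:
--         pass
--   if count == 26:
--     return "true"
--   else:
--     return "false"
--   return text
-- ===== SOURCE B (Python) =====
-- def AlphabetSearching(strParam):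
--   needed = set("abcdefghijklmnopqrstuvwsyz")
--   return "true" if needed <= set(strParam) else "false"
-- ===== Notes on version B (the rewrite author's own statement) =====
-- stated objective: simpler
-- what changed: Replaces the nested count-over-26-letters loop over the string's char set with a single subset test of the deduplicated (buggy) alphabet against set(strParam); equality holds because the duplicated alphabet letter makes the count reach 26 exactly when every distinct alphabet letter is present.
import Mathlib
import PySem

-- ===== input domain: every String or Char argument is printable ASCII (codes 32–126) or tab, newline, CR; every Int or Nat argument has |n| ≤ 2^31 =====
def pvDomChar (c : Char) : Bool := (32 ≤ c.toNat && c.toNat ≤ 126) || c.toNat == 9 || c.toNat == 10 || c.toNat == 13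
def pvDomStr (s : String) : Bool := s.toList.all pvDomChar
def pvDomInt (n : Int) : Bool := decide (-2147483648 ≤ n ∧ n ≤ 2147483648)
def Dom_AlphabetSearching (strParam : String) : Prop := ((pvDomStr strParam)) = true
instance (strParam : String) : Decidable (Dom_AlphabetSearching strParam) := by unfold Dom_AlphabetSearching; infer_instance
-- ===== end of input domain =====

-- B replaces A's nested 26×(distinct chars) counting loops by a single subset test of the
-- deduplicated (buggy) alphabet against set(strParam); objective: simpler.

-- ===== PORT A =====
-- Literal port: outer loop over the distinct chars of strParam (Python iterates the set;
-- the summed count is independent of that order), inner loop over the 26 alphabet chars.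
-- The 'if text[i].isalpha() == False: pass' branch is a no-op and is not ported.
def AlphabetSearching (strParam : String) : String :=
  let alpList : List Char := "abcdefghijklmnopqrstuvwsyz".toList
  let t : PySem.Set Char := PySem.Set.ofList strParam.toList
  let text : List Char := t
  let count : Int := text.foldl
    (fun acc c => alpList.foldl (fun a2 a => if a = c then a2 + 1 else a2) acc) 0
  if count = 26 then "true" else "false"

-- ===== PORT B =====
def AlphabetSearching_alt (strParam : String) : String :=
  let needed : PySem.Set Char := PySem.Set.ofList "abcdefghijklmnopqrstuvwsyz".toList
  if PySem.Set.issubset needed (PySem.Set.ofList strParam.toList) then "true" else "false"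

-- ===== PRECONDITION & SPEC =====
def Spec_AlphabetSearching (strParam : String) (out : String) : Prop := out = AlphabetSearching_alt strParam
instance (strParam : String) (out : String) : Decidable (Spec_AlphabetSearching strParam out) := by unfold Spec_AlphabetSearching; infer_instance

-- ===== CLAIM (what is proved, stated in full; the proofs are below) =====
def Claim_equal_AlphabetSearching : Prop := ∀ (strParam : String), Dom_AlphabetSearching strParam → Spec_AlphabetSearching strParam (AlphabetSearching strParam)

-- ===== LEMMAS AND PROOFS =====

-- inner loop: adds the number of occurrences of c in L
theorem pv_inner (L : List Char) (c : Char) (acc : Int) :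
    L.foldl (fun a2 a => if a = c then a2 + 1 else a2) acc = acc + (L.count c : Int) := by
  induction L generalizing acc with
  | nil => simp
  | cons a L ih =>
    rw [List.foldl_cons]
    by_cases h : a = c
    · rw [if_pos h, ih]
      have hc : ((a :: L).count c : Int) = (L.count c : Int) + 1 := by
        simp [h]
      omega
    · rw [if_neg h, ih]
      have hc : ((a :: L).count c : Int) = (L.count c : Int) := by
        simp [h]
      omega

-- folding addition accumulates the sum
theorem pv_foldl_add (f : Char → Int) (S : List Char) (acc : Int) :
    S.foldl (fun a c => a + f c) acc = acc + (S.map f).sum := by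
  induction S generalizing acc with
  | nil => simp
  | cons s S ih => rw [List.foldl_cons, ih, List.map_cons, List.sum_cons]; ring

-- outer loop: sums the occurrence counts over the distinct chars
theorem pv_outer (S L : List Char) (acc : Int) :
    S.foldl (fun acc c => L.foldl (fun a2 a => if a = c then a2 + 1 else a2) acc) acc
      = acc + (S.map (fun c => (L.count c : Int))).sum := by
  have he : (fun (acc : Int) c => L.foldl (fun a2 a => if a = c then a2 + 1 else a2) acc)
      = fun acc c => acc + (L.count c : Int) := by
    funext acc c; exact pv_inner L c acc
  rw [he, pv_foldl_add]

-- Σ_{c ∈ S} [c = a] = [a ∈ S] for a duplicate-free S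
theorem pv_indicator (a : Char) (S : List Char) (h : S.Nodup) :
    (S.map (fun c => (if c = a then (1:Int) else 0))).sum = if a ∈ S then 1 else 0 := by
  induction S with
  | nil => simp
  | cons s S ih =>
    simp only [List.nodup_cons] at h
    by_cases hsa : s = a
    · subst hsa
      have hz : (S.map (fun c => (if c = s then (1:Int) else 0))).sum = 0 := by
        apply List.sum_eq_zero; intro x hx
        simp only [List.mem_map] at hx
        obtain ⟨c, hc, rfl⟩ := hx
        simp [show c ≠ s from fun e => h.1 (e ▸ hc)]
      simp [hz]
    · by_cases ha : a ∈ S <;> simp [hsa, Ne.symm hsa, ha, ih h.2]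

-- sum swap: Σ_{c ∈ S} count(c, L) = |{a ∈ L | a ∈ S}| when S has no duplicates
theorem pv_swap (L S : List Char) (h : S.Nodup) :
    (S.map (fun c => (L.count c : Int))).sum
      = ((L.filter (fun a => decide (a ∈ S))).length : Int) := by
  induction L with
  | nil => simp
  | cons a L ih =>
    have hsplit : (S.map (fun c => (((a :: L).count c : Nat) : Int))).sum
        = (S.map (fun c => (L.count c : Int))).sum
          + (S.map (fun c => (if c = a then (1:Int) else 0))).sum := by
      rw [← List.sum_map_add]
      congr 1
      apply List.map_congr_left
      intro c _
      by_cases hc : c = a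
      · simp [hc]
      · simp [hc, Ne.symm hc]
    rw [hsplit, ih, pv_indicator a S h]
    by_cases ha : a ∈ S <;> simp [ha]

-- full-length filter means every element satisfies the predicate
theorem pv_filter_all (L S : List Char) :
    (L.filter (fun a => decide (a ∈ S))).length = L.length ↔ ∀ a ∈ L, a ∈ S := by
  rw [List.length_filter_eq_length_iff]; simp

-- the two if-conditions agree
theorem pv_cond (s : String) :
    ((0:Int) + ((("abcdefghijklmnopqrstuvwsyz".toList).filter
        (fun a => decide (a ∈ PySem.Set.ofList s.toList))).length : Int) = 26)
      ↔ (PySem.Set.issubset (PySem.Set.ofList "abcdefghijklmnopqrstuvwsyz".toList)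
          (PySem.Set.ofList s.toList) = true) := by
  rw [PySem.Set.issubset_iff]
  have hlen : ("abcdefghijklmnopqrstuvwsyz".toList).length = 26 := by decide
  constructor
  · intro h
    have h26 : (("abcdefghijklmnopqrstuvwsyz".toList).filter
        (fun a => decide (a ∈ PySem.Set.ofList s.toList))).length = 26 := by omega
    intro x hx
    rw [PySem.Set.mem_ofList] at hx
    exact ((pv_filter_all _ _).mp (by rw [h26, hlen])) x hx
  · intro h
    have hall : ∀ a ∈ "abcdefghijklmnopqrstuvwsyz".toList, a ∈ PySem.Set.ofList s.toList := by
      intro a ha; exact h a ((PySem.Set.mem_ofList _ _).mpr ha)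
    have := (pv_filter_all "abcdefghijklmnopqrstuvwsyz".toList (PySem.Set.ofList s.toList)).mpr hall
    omega

-- ===== VERDICT (by name: the statement is the Claim_ definition above) =====
theorem AlphabetSearching_spec : Claim_equal_AlphabetSearching := by
  intro s _
  unfold Spec_AlphabetSearching AlphabetSearching AlphabetSearching_alt
  dsimp only
  rw [pv_outer, pv_swap _ _ (PySem.Set.nodup_ofList _)]
  exact if_congr (pv_cond s) rfl rfl
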